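-- pv_equiv track=rewrite | github.com/alina-z7/adv--algorithms | Algorithms/homework/topological_sort.py | topo
-- ===== SOURCE A (Python) =====
-- def in_degree(G, v):
--   """Find the in-degree of vertex v in the input
--   directed acyclic graph -- dag
--
--   Inputs
--   ------
--   dag : list of lists
--     adj list for input graph
--   v : int
--     a vertex in dag
--
--   Returns
--   int : the in-degree of v
--   """
--
--   # initialize count for in-degree - number of incoming edges for the vertex v
--   in_degree = 0
--
--   for vertex_list in G: # iterate through each vertex list in the graph G
--     for neighbor in vertex_list: # iterate through each neighbor in the vertex list
--       # if v seems to be in a vertex list (or it matches with a neighbor in the vertex list),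
--       # it means there is an incoming edge from the list index i, 0 <= i <= len(G) - 1 for v
--       if neighbor == v:
--         # if so, increment in-degree count
--         in_degree += 1
--         # return the in-degree for v
--   return in_degree
--
-- def topo(G):
--   """Find the in-degree of vertex v in the input
--   directed acyclic graph -- dag
--
--   Inputs
--   ------
--   dag : list of lists
--     adj list for input graph; assume graph is acyclic and directed
--
--   Returns
--   int list:
--     topological ordering of the graph's vertices
--   """
--   # initialize a dictionary to store key/value pairs of (vertex v, in_degree(G, v))
--   topo_dict = {}
--   # initialize vertex iterator for the graph G
--   v = len(G) - 1
--
--   # while we are in bounds of G with v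
--   while v >= 0:
--     topo_dict[v] = in_degree(G, v) # store (v, in_degree(G, v)) for each v
--     v -= 1 # go to next v
--     # sort the dictionary pairs based on the in_degree values from min to max and store them in a new dictionary
--   sort_dict = dict(sorted(topo_dict.items(), key=lambda x:x[1]))
--   # return the list of topological sorted v's that are paired with the sorted in_degree values
--   return list(sort_dict.keys())
-- ===== SOURCE B (Python) =====
-- def topo(G):
--     # one pass of in-degree counting, then a single keyed sort (asymptotically faster than rescanning G per vertex)
--     deg = {}
--     for vertex_list in G:
--         for u in vertex_list:
--             deg[u] = deg.get(u, 0) + 1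
--     return sorted(range(len(G)), key=lambda v: (deg.get(v, 0), -v))
-- ===== Notes on version B (the rewrite author's own statement) =====
-- stated objective: faster
-- what changed: B counts all in-degrees in one pass over the adjacency lists with a dictionary instead of rescanning the whole graph for every vertex, then produces the order with a single keyed sort (in-degree ascending, vertex descending tie-break, matching A's stable sort of the descending-vertex insertion order).
import Mathlib
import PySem

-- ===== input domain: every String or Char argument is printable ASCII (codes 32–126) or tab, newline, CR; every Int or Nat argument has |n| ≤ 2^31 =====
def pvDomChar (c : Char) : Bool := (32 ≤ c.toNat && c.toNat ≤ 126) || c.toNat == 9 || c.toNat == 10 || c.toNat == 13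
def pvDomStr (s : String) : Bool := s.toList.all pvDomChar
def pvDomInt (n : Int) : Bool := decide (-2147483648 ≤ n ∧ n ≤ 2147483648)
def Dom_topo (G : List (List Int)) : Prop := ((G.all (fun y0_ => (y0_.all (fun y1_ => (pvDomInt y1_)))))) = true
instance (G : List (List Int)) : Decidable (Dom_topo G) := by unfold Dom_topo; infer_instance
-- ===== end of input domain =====

-- B replaces A's per-vertex rescan of the whole graph by one counting pass over the adjacency lists
-- followed by a single keyed sort; same return value.

-- ===== PORT A =====
def in_degree (G : List (List Int)) (v : Int) : Int :=
  G.foldl (fun acc vertex_list =>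
    vertex_list.foldl (fun acc neighbor => if neighbor == v then acc + 1 else acc) acc) 0

def topo (G : List (List Int)) : List Int :=
  -- the 'while v >= 0' countdown from len(G)-1 is the iteration over range(len(G)-1, -1, -1)
  let topo_dict := (PySem.List.pyRange ((G.length : Int) - 1) (-1) (-1)).foldl
      (fun d v => d.insert v (in_degree G v)) PySem.Dict.empty
  let sort_dict := (PySem.List.sorted topo_dict.items (fun x => x.2) false).foldl
      (fun d p => d.insert p.1 p.2) PySem.Dict.empty
  sort_dict.keys

-- ===== PORT B =====
def topo_alt (G : List (List Int)) : List Int :=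
  let deg := G.foldl (fun d vertex_list =>
      vertex_list.foldl (fun d u => d.insert u (d.getD u 0 + 1)) d)
      (PySem.Dict.empty : PySem.Dict Int Int)
  PySem.List.sorted2 (PySem.List.pyRange 0 (G.length : Int) 1)
    (fun v => deg.getD v 0) (fun v => -v) false

-- ===== PRECONDITION & SPEC =====
def Spec_topo (G : List (List Int)) (out : List Int) : Prop := out = topo_alt G
instance (G : List (List Int)) (out : List Int) : Decidable (Spec_topo G out) := by unfold Spec_topo; infer_instance

-- ===== CLAIM (what is proved, stated in full; the proofs are below) =====
def Claim_equal_topo : Prop := ∀ (G : List (List Int)), Dom_topo G → Spec_topo G (topo G)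

-- ===== LEMMAS AND PROOFS =====

theorem pyRange_down (n : Nat) :
    PySem.List.pyRange ((n : Int) - 1) (-1) (-1)
      = (List.range n).map (fun k : Nat => (n : Int) - 1 - (k : Int)) := by
  simp only [PySem.List.pyRange]
  rw [if_neg (by norm_num), if_neg (by norm_num)]
  rcases Nat.eq_zero_or_pos n with h | h
  · subst h
    rw [if_neg (by norm_num)]
    simp
  · rw [if_pos (by omega : (-1 : Int) < (n : Int) - 1)]
    have h2 : (((n : Int) - 1 - -1 + - -1 - 1) / - -1).toNat = n := by
      have : ((n : Int) - 1 - -1 + - -1 - 1) / - -1 = (n : Int) := by norm_num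
      rw [this, Int.toNat_natCast]
    rw [h2]
    apply List.map_congr_left
    intro k _
    ring

theorem in_degree_eq_count (G : List (List Int)) (v : Int) :
    in_degree G v = (G.flatten.count v : Int) := by
  unfold in_degree
  rw [PySem.List.foldl_congr_mem G _ (fun acc l => acc + (l.count v : Int)) 0
    (fun acc l _ => PySem.List.foldl_beq_add_one l v acc)]
  rw [PySem.List.foldl_add, List.count_flatten]
  push_cast
  simp [Function.comp_def]

theorem deg_getD_eq_count (G : List (List Int)) (v : Int) :
    (G.foldl (fun d vertex_list =>
        vertex_list.foldl (fun d u => d.insert u (d.getD u 0 + 1)) d)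
        (PySem.Dict.empty : PySem.Dict Int Int)).getD v 0
      = (G.flatten.count v : Int) := by
  suffices h : ∀ (d : PySem.Dict Int Int), (G.foldl (fun d vertex_list =>
      vertex_list.foldl (fun d u => d.insert u (d.getD u 0 + 1)) d) d).getD v 0
      = d.getD v 0 + (G.flatten.count v : Int) by
    simpa using h PySem.Dict.empty
  induction G with
  | nil => simp
  | cons l G ih =>
    intro d
    simp only [List.foldl_cons, ih, PySem.Dict.getD_foldl_insert_add_one, List.flatten_cons,
      List.count_append]
    push_cast
    ring

-- two comparators that agree on the current accumulated list insert an element identically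
theorem insertBy_congr {α : Type} (b1 b2 : α → α → Bool) (x : α) (acc : List α)
    (h : ∀ y ∈ acc, b1 x y = b2 x y) :
    PySem.List.insertBy b1 x acc = PySem.List.insertBy b2 x acc := by
  induction acc with
  | nil => rfl
  | cons y ys ih =>
    simp only [PySem.List.insertBy]
    rw [h y (by simp)]
    split
    · rfl
    · rw [ih (fun z hz => h z (by simp [hz]))]

theorem foldl_insertBy_congr {α : Type} (b1 b2 : α → α → Bool) :
    ∀ (xs acc : List α), (∀ x ∈ xs, ∀ y ∈ acc, b1 x y = b2 x y) →
    xs.Pairwise (fun a b => b1 b a = b2 b a) →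
    xs.foldl (fun acc x => PySem.List.insertBy b1 x acc) acc
      = xs.foldl (fun acc x => PySem.List.insertBy b2 x acc) acc := by
  intro xs
  induction xs with
  | nil => intro acc _ _; rfl
  | cons x xs ih =>
    intro acc hacc hpw
    have hx : PySem.List.insertBy b1 x acc = PySem.List.insertBy b2 x acc :=
      insertBy_congr b1 b2 x acc (hacc x (by simp))
    simp only [List.foldl_cons, hx]
    apply ih
    · intro z hz y hy
      rw [PySem.List.mem_insertBy] at hy
      rcases hy with rfl | hy
      · exact (List.pairwise_cons.1 hpw).1 z hz
      · exact hacc z (by simp [hz]) y hy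
    · exact (List.pairwise_cons.1 hpw).2

-- STABILITY: a stable sort of a list that comes in strictly increasing tiebreak order
-- equals the sort that uses that tiebreak as a second key
theorem sorted_eq_sorted2_of_pairwise {α κ₁ κ₂ : Type} [LinearOrder κ₁] [LinearOrder κ₂]
    (xs : List α) (k1 : α → κ₁) (k2 : α → κ₂)
    (h : xs.Pairwise (fun a b => k2 a < k2 b)) :
    PySem.List.sorted xs k1 false = PySem.List.sorted2 xs k1 k2 false := by
  simp only [PySem.List.sorted, PySem.List.sorted2, Bool.false_eq_true, if_false]
  apply foldl_insertBy_congr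
  · intro x _ y hy
    simp at hy
  · refine h.imp ?_
    intro a b hab
    simp [lt_asymm hab]

-- sorted2 is sorted with the lexicographic key
theorem sorted2_eq_sorted_toLex {α κ₁ κ₂ : Type} [LinearOrder κ₁] [LinearOrder κ₂]
    (xs : List α) (k1 : α → κ₁) (k2 : α → κ₂) :
    PySem.List.sorted2 xs k1 k2 false
      = PySem.List.sorted xs (fun x => toLex (k1 x, k2 x)) false := by
  have hb : (fun a b => decide (k1 a < k1 b) || (!decide (k1 b < k1 a) && decide (k2 a < k2 b)))
      = (fun a b : α => decide (toLex (k1 a, k2 a) < toLex (k1 b, k2 b))) := by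
    funext a b
    rcases lt_trichotomy (k1 a) (k1 b) with h | h | h
    · simp [Prod.Lex.lt_iff, h]
    · simp [Prod.Lex.lt_iff, h]
    · simp [Prod.Lex.lt_iff, lt_asymm h, h.ne']
      intro hle
      exact absurd (lt_of_lt_of_le h hle) (lt_irrefl _)
  simp only [PySem.List.sorted2, PySem.List.sorted, Bool.false_eq_true, if_false, hb]

theorem topo_eq (G : List (List Int)) : topo G = topo_alt G := by
  have hcount := in_degree_eq_count G
  set n := G.length with hn
  set c : Int → Int := fun v => (G.flatten.count v : Int) with hc
  set kR : Int → Lex (Int × Int) := fun v => toLex (c v, -v) with hkR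
  set f : Int → Int × Int := fun v => (v, c v) with hf
  set L : List Int := (List.range n).map (fun k : Nat => (n : Int) - 1 - (k : Int)) with hL
  set R : List Int := (List.range n).map (fun k : Nat => (k : Int)) with hR
  have hLnd : L.Nodup := List.Nodup.map (fun a b hab => by omega) List.nodup_range
  have hRnd : R.Nodup := List.Nodup.map (fun a b hab => by exact_mod_cast hab) List.nodup_range
  have hRL : R.Perm L := by
    rw [List.perm_ext_iff_of_nodup hRnd hLnd]
    intro v
    simp only [hR, hL, List.mem_map, List.mem_range]
    constructor
    · rintro ⟨k, hk, rfl⟩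
      exact ⟨n - 1 - k, by omega, by omega⟩
    · rintro ⟨k, hk, rfl⟩
      exact ⟨n - 1 - k, by omega, by omega⟩
  set ys : List Int := PySem.List.sorted R kR false with hys
  have hysperm : ys.Perm R := PySem.List.sorted_perm R kR false
  have hkRinj : ∀ a b : Int, kR a = kR b → a = b := by
    intro a b hab
    have := congrArg (fun x => (ofLex x).2) hab
    simp [hkR] at this
    omega
  have hyslt : ys.Pairwise (fun a b => kR a < kR b) := by
    have hle : ys.Pairwise (fun a b => kR a ≤ kR b) := PySem.List.sorted_pairwise R kR
    have hne : ys.Pairwise (fun a b : Int => a ≠ b) := hysperm.symm.nodup hRnd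
    exact (hle.and hne).imp (fun {a b} h => lt_of_le_of_ne h.1 (fun he => h.2 (hkRinj a b he)))
  simp only [topo, topo_alt]
  rw [pyRange_down, ← hn, ← hL]
  have hitems : ((L.foldl (fun d v => d.insert v (in_degree G v)) PySem.Dict.empty)).items
      = L.map f := by
    rw [PySem.Dict.items_foldl_insert_fresh L (fun v => v) (fun v => in_degree G v)
      PySem.Dict.empty (fun a _ => by simp) (by simpa using hLnd)]
    simp only [show (PySem.Dict.empty : PySem.Dict Int Int).items = [] from rfl, List.nil_append]
    exact List.map_congr_left (fun v _ => by rw [hcount v, hf])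
  rw [hitems]
  have hpw : (L.map f).Pairwise (fun p q : Int × Int => -p.1 < -q.1) := by
    rw [List.pairwise_map]
    simp only [hf]
    rw [hL, List.pairwise_map]
    exact List.pairwise_lt_range.imp (fun {a b} h => by omega)
  rw [sorted_eq_sorted2_of_pairwise (L.map f) (fun p => p.2) (fun p => -p.1) hpw,
    sorted2_eq_sorted_toLex]
  have hsorted : PySem.List.sorted (L.map f) (fun p => toLex (p.2, -p.1)) false = ys.map f := by
    apply PySem.List.sorted_eq_of_perm_of_pairwise_lt
    · exact (hysperm.map f).trans (hRL.map f)
    · rw [List.pairwise_map]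
      exact hyslt
  rw [hsorted]
  have hkeys : ((ys.map f).foldl (fun d p => d.insert p.1 p.2) PySem.Dict.empty).keys = ys := by
    rw [PySem.Dict.keys_foldl_insert_key (ys.map f) (fun p => p.1) (fun _ p => p.2)
      PySem.Dict.empty]
    rw [PySem.Dict.keys_empty, PySem.Set.update_nil_left]
    rw [List.map_map]
    have : (Prod.fst ∘ f) = id := by funext v; simp [hf]
    rw [this, List.map_id]
    exact PySem.Set.ofList_eq_self_of_nodup ys (hysperm.symm.nodup hRnd)
  rw [hkeys]
  have hdeg : (fun v : Int => (G.foldl (fun d vertex_list =>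
      vertex_list.foldl (fun d u => d.insert u (d.getD u 0 + 1)) d)
      (PySem.Dict.empty : PySem.Dict Int Int)).getD v 0) = c := by
    funext v
    rw [deg_getD_eq_count, hc]
  rw [show ((G.length : Int)) = ((n : Nat) : Int) from rfl, PySem.List.pyRange_zero_natCast, ← hR]
  have hB : PySem.List.sorted2 R (fun v : Int => (G.foldl (fun d vertex_list =>
      vertex_list.foldl (fun d u => d.insert u (d.getD u 0 + 1)) d)
      (PySem.Dict.empty : PySem.Dict Int Int)).getD v 0)
      (fun v : Int => -v) false = ys := by
    refine (congrArg (fun k : Int → Int =>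
      PySem.List.sorted2 R k (fun v : Int => -v) false) hdeg).trans ?_
    rw [sorted2_eq_sorted_toLex R c (fun v => -v)]
  exact hB.symm

-- ===== VERDICT (by name: the statement is the Claim_ definition above) =====
theorem topo_spec : Claim_equal_topo := by
  intro G _
  exact topo_eq G
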